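-- pv_equiv track=rewrite | github.com/jchen73-pixel/py_processing | Everything/py5/ziplist.py | zipLists
-- ===== SOURCE A (Python) =====
-- def zipLists(a, b):
--      new = []
--      i = 0
--      while len(a) > i and len(b) > i:
--         new += [a[i], b[i]]
--         i += 1
--      new += a[i:] + b[i:]
--      return new
-- ===== SOURCE B (Python) =====
-- def zipLists(a, b):
--     n = min(len(a), len(b))
--     new = [None] * (2 * n)
--     new[0::2] = a[:n]
--     new[1::2] = b[:n]
--     return new + a[n:] + b[n:]
-- ===== Notes on version B (the rewrite author's own statement) =====
-- stated objective: faster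
-- what changed: Replaces the index-driven while loop that appends one pair per iteration with two bulk strided slice assignments into a preallocated list plus a single tail concatenation.
import Mathlib
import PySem

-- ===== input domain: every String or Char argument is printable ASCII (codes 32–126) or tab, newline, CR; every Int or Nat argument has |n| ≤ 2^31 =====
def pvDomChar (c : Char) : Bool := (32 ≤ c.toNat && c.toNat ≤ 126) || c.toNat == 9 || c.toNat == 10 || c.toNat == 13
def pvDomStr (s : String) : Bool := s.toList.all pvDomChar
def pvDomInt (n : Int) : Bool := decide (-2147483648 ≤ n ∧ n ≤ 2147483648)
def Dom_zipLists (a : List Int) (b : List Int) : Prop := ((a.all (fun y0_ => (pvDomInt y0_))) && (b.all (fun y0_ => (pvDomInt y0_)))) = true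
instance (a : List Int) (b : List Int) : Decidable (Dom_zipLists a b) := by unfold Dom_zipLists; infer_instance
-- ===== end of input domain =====

-- B replaces A's one-pair-at-a-time while loop with bulk even/odd strided slice writes plus a tail concatenation.
-- ===== PORT A =====
-- the while loop: state (i, new); condition len(a) > i and len(b) > i
def zipListsLoop (a : List Int) (b : List Int) (i : Nat) (new : List Int) : List Int :=
  if i < a.length ∧ i < b.length then
    zipListsLoop a b (i + 1) (new ++ [a.getD i 0, b.getD i 0])
  else
    new ++ (a.drop i ++ b.drop i)
termination_by a.length - i

def zipLists (a : List Int) (b : List Int) : List Int :=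
  zipListsLoop a b 0 []

-- ===== PORT B =====
def zipLists_alt (a : List Int) (b : List Int) : List Int :=
  let n := min a.length b.length
  -- new = [None]*(2n); new[0::2] = a[:n]; new[1::2] = b[:n]  — the two strided
  -- slice writes fill even slots from a[:n] and odd slots from b[:n]:
  let new := ((a.take n).zip (b.take n)).flatMap (fun p => [p.1, p.2])
  new ++ (a.drop n ++ b.drop n)

-- ===== PRECONDITION & SPEC =====
def Spec_zipLists (a : List Int) (b : List Int) (out : List Int) : Prop := out = zipLists_alt a b
instance (a : List Int) (b : List Int) (out : List Int) : Decidable (Spec_zipLists a b out) := by unfold Spec_zipLists; infer_instance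

-- ===== CLAIM (what is proved, stated in full; the proofs are below) =====
def Claim_equal_zipLists : Prop := ∀ (a : List Int) (b : List Int), Dom_zipLists a b → Spec_zipLists a b (zipLists a b)

-- ===== LEMMAS AND PROOFS =====
def interleave : List Int → List Int → List Int
  | [], ys => ys
  | xs, [] => xs
  | x :: xs, y :: ys => x :: y :: interleave xs ys

theorem interleave_nil_right (xs : List Int) : interleave xs [] = xs := by
  cases xs <;> rfl

theorem zipListsLoop_eq (a b : List Int) (i : Nat) (new : List Int) :
    zipListsLoop a b i new = new ++ interleave (a.drop i) (b.drop i) := by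
  rw [zipListsLoop]
  split
  · rename_i h
    obtain ⟨ha, hb⟩ := h
    rw [zipListsLoop_eq]
    have hda : a.drop i = a[i] :: a.drop (i + 1) := List.drop_eq_getElem_cons ha
    have hdb : b.drop i = b[i] :: b.drop (i + 1) := List.drop_eq_getElem_cons hb
    rw [hda, hdb]
    simp [interleave, List.getD, ha, hb]
  · rename_i h
    rcases Nat.lt_or_ge i a.length with hlt | hge
    · have hb : b.length ≤ i := by
        by_contra hb'
        exact h ⟨hlt, Nat.lt_of_not_le hb'⟩
      rw [List.drop_eq_nil_of_le hb, interleave_nil_right]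
      simp
    · rw [List.drop_eq_nil_of_le hge]
      simp [interleave]
termination_by a.length - i

theorem zipLists_alt_eq (a b : List Int) :
    zipLists_alt a b = interleave a b := by
  induction a generalizing b with
  | nil => cases b <;> simp [zipLists_alt, interleave]
  | cons x xs ih =>
    cases b with
    | nil => simp [zipLists_alt, interleave]
    | cons y ys =>
      have := ih ys
      simp [zipLists_alt, interleave] at this ⊢
      simpa using this

-- ===== VERDICT (by name: the statement is the Claim_ definition above) =====
theorem zipLists_spec : Claim_equal_zipLists := by
  intro a b _
  unfold Spec_zipLists zipLists
  rw [zipListsLoop_eq, zipLists_alt_eq]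
  simp
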